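-- pv_equiv track=rewrite | github.com/GlowingScrewdriver/pyjuter | pyjuter/module.py | split_toplevel_stmts
-- ===== SOURCE A (Python) =====
-- from collections.abc import Iterable
--
-- def split_toplevel_stmts (source: Iterable[str]) -> Iterable[str]:
--     """
--     Split the provided Python source into chunks on the basis of
--     blank lines between top-level statements.
--
--     The intention is for each chunk to become a cell in a
--     Jupyter Notebook.
--
--     `source` is an iterator over lines of the source
--     (excluding newline characters).
--     An iterator over the resulting chunks (without trailing
--     newlines) is returned.
--     """
--     chunk = []
--     lastline = None
--     for line in source:
--         if line:
--             if not line [0].isspace ():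
--                 # This is the beginning of a statement ... ->
--                 if lastline == "":
--                    # -> ... after a blank line
--                    yield "\n".join (chunk)
--                    chunk = []
--
--         chunk.append (line)
--         lastline = line
--
--     # Don't forget the last chunk!
--     if chunk:
--         yield "\n".join (chunk)
-- ===== SOURCE B (Python) =====
-- def split_toplevel_stmts(source):
--     """Right-to-left re-implementation: walk the lines in reverse, closing a
--     chunk whenever a blank line immediately precedes a top-level statement."""
--     lines = list(source)
--     out = []    # completed chunks, rightmost first
--     chunk = []  # the current (leftmost known) chunk, its lines in reverse order
--     for l in reversed(lines):
--         if chunk and l == "" and chunk[-1] and not chunk[-1][0].isspace():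
--             out.append("\n".join(reversed(chunk)))
--             chunk = [l]
--         else:
--             chunk.append(l)
--     if chunk:
--         out.append("\n".join(reversed(chunk)))
--     yield from reversed(out)
-- ===== Notes on version B (the rewrite author's own statement) =====
-- stated objective: alternative
-- what changed: B walks the lines right-to-left in a single reverse pass, closing a chunk whenever a blank line immediately precedes a top-level statement line, instead of A's left-to-right generator with an accumulating chunk buffer and a lastline sentinel.
import Mathlib
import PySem

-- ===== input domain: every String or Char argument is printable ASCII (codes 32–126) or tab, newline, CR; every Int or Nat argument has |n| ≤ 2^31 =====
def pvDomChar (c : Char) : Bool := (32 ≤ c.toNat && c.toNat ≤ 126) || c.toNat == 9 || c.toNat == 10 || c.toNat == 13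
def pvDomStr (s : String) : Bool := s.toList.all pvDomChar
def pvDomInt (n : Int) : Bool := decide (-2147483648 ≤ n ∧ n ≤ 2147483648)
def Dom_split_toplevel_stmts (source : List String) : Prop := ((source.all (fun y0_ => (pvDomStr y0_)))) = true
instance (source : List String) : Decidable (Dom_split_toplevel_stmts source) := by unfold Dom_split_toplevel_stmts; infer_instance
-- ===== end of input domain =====

-- B re-implements the chunk split as a single right-to-left pass that closes a
-- chunk whenever a blank line immediately precedes a top-level statement line
-- (objective: alternative decomposition, no lastline sentinel). Both ports
-- return the list of yielded chunks of the Python generators.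

-- ===== PORT A =====
-- loop body of A's for-loop, as a named helper; state = (chunk, lastline, out)
def pvStepA (s : List String × Option String × List String) (line : String) :
    List String × Option String × List String :=
  let chunk := s.1
  let lastline := s.2.1
  let out := s.2.2
  let co :=
    if line != "" then
      if !((PySem.Str.pyGet? line 0).any PySem.Chars.isspace) then
        if lastline == some "" then
          ([], out ++ [PySem.Str.join "\n" chunk])
        else (chunk, out)
      else (chunk, out)
    else (chunk, out)
  (co.1 ++ [line], some line, co.2)

def split_toplevel_stmts (source : List String) : List String :=
  let st := source.foldl pvStepA ([], none, [])
  if st.1 != [] then st.2.2 ++ [PySem.Str.join "\n" st.1] else st.2.2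

-- ===== PORT B =====
-- loop body of B's for-loop over reversed(lines); state = (out, chunk),
-- the current chunk kept with its lines in reverse order
def pvStepB (s : List String × List String) (l : String) :
    List String × List String :=
  let out := s.1
  let chunk := s.2
  if (chunk != []) && (l == "") &&
      chunk.getLast?.any (fun f => (f != "") && !((PySem.Str.pyGet? f 0).any PySem.Chars.isspace)) then
    (out ++ [PySem.Str.join "\n" chunk.reverse], [l])
  else
    (out, chunk ++ [l])

def split_toplevel_stmts_alt (source : List String) : List String :=
  let lines := source
  let st := lines.reverse.foldl pvStepB ([], [])
  let out := if st.2 != [] then st.1 ++ [PySem.Str.join "\n" st.2.reverse] else st.1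
  out.reverse

-- ===== PRECONDITION & SPEC =====
def Spec_split_toplevel_stmts (source : List String) (out : List String) : Prop := out = split_toplevel_stmts_alt source
instance (source : List String) (out : List String) : Decidable (Spec_split_toplevel_stmts source out) := by unfold Spec_split_toplevel_stmts; infer_instance

-- ===== CLAIM (what is proved, stated in full; the proofs are below) =====
def Claim_equal_split_toplevel_stmts : Prop := ∀ (source : List String), Dom_split_toplevel_stmts source → Spec_split_toplevel_stmts source (split_toplevel_stmts source)

-- ===== LEMMAS AND PROOFS =====

-- A's boundary test between the current line and the previous one
def pvBdry (l : String) (last : Option String) : Bool :=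
  (l != "") && !((PySem.Str.pyGet? l 0).any PySem.Chars.isspace) && (last == some "")

-- B's boundary test between the current line and the chunk to its right
def pvSplitH (l : String) (c : List String) : Bool :=
  (c != []) && (l == "") &&
    c.head?.any (fun f => (f != "") && !((PySem.Str.pyGet? f 0).any PySem.Chars.isspace))

-- A's loop, written as structural recursion with explicit state
def pvF (chunk : List String) (last : Option String) : List String → List String
  | [] => if chunk != [] then [PySem.Str.join "\n" chunk] else []
  | l :: rest =>
      if pvBdry l last then PySem.Str.join "\n" chunk :: pvF [l] (some l) rest
      else pvF (chunk ++ [l]) (some l) rest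

-- prepend one line to a segmentation (the one step of the common characterisation)
def pvGcons (l : String) (ys : List (List String)) : List (List String) :=
  match ys with
  | [] => [[l]]
  | c :: cs => if pvSplitH l c then [l] :: c :: cs else (l :: c) :: cs

-- the common characterisation: the segments of the input, split at boundaries
def pvG : List String → List (List String)
  | [] => []
  | l :: rest => pvGcons l (pvG rest)

-- merge a pending chunk into the first segment
def pvMerge (chunk : List String) : List (List String) → List (List String)
  | [] => [chunk]
  | c :: cs => (chunk ++ c) :: cs

-- pvF with a pending chunk/last state, expressed through pvG
def pvGS (chunk : List String) (last : Option String) (lines : List String) :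
    List (List String) :=
  match lines with
  | [] => if chunk != [] then [chunk] else []
  | l :: rest =>
      if pvBdry l last then chunk :: pvG (l :: rest)
      else pvMerge chunk (pvG (l :: rest))

theorem pvG_head (r : String) (rs : List String) :
    ∃ t css, pvG (r :: rs) = (r :: t) :: css := by
  rw [show pvG (r :: rs) = pvGcons r (pvG rs) from rfl]
  cases h : pvG rs with
  | nil => exact ⟨[], [], by simp [pvGcons]⟩
  | cons c cs =>
    by_cases hs : pvSplitH r c
    · exact ⟨[], c :: cs, by simp [pvGcons, hs]⟩
    · exact ⟨c, cs, by simp [pvGcons, hs]⟩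

theorem pvBdry_eq_splitH (r l : String) (t : List String) :
    pvBdry r (some l) = pvSplitH l (r :: t) := by
  simp only [pvBdry, pvSplitH]
  cases hr : (r != "") <;> cases hl : (l == "") <;>
    simp [hr, hl, Bool.and_comm]

theorem pvGS_snoc (rest : List String) (l : String) (chunk : List String) :
    pvGS (chunk ++ [l]) (some l) rest = pvMerge chunk (pvG (l :: rest)) := by
  cases rest with
  | nil => simp [pvGS, pvG, pvGcons, pvMerge]
  | cons r rs =>
    obtain ⟨t, css, hg⟩ := pvG_head r rs
    have hGl : pvG (l :: r :: rs) =
        if pvSplitH l (r :: t) then [l] :: (r :: t) :: css else (l :: r :: t) :: css := by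
      rw [show pvG (l :: r :: rs) = pvGcons l (pvG (r :: rs)) from rfl, hg]
      simp [pvGcons]
    by_cases hb : pvBdry r (some l) = true
    · have hs : pvSplitH l (r :: t) = true := by rw [← pvBdry_eq_splitH r l t]; exact hb
      simp only [pvGS, if_pos hb, hGl, if_pos hs, hg]
      simp [pvMerge]
    · have hb' : pvBdry r (some l) = false := by
        revert hb; cases pvBdry r (some l) <;> simp
      have hs : pvSplitH l (r :: t) = false := by rw [← pvBdry_eq_splitH r l t]; exact hb'
      simp only [pvGS, hb', Bool.false_eq_true, if_false, hGl, hs, hg]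
      simp [pvMerge]

theorem pvGS_single (rest : List String) (l : String) :
    pvGS [l] (some l) rest = pvG (l :: rest) := by
  have h := pvGS_snoc rest l []
  simp only [List.nil_append] at h
  rw [h]
  obtain ⟨t, css, hg⟩ := pvG_head l rest
  rw [hg]
  simp [pvMerge]

theorem pvF_eq_pvGS (lines : List String) :
    ∀ chunk last, pvF chunk last lines = (pvGS chunk last lines).map (PySem.Str.join "\n") := by
  induction lines with
  | nil =>
    intro chunk last
    by_cases h : chunk = [] <;> simp [pvF, pvGS, h]
  | cons l rest ih =>
    intro chunk last
    simp only [pvF, pvGS]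
    by_cases hb : pvBdry l last = true
    · rw [if_pos hb, if_pos hb, ih, pvGS_single]
      simp
    · rw [if_neg hb, if_neg hb, ih, pvGS_snoc]

theorem A_fold (lines : List String) :
    ∀ chunk last out,
      (let st := lines.foldl pvStepA (chunk, last, out);
       if st.1 != [] then st.2.2 ++ [PySem.Str.join "\n" st.1] else st.2.2) =
        out ++ pvF chunk last lines := by
  induction lines with
  | nil =>
    intro chunk last out
    by_cases h : chunk = [] <;> simp [pvF, h]
  | cons l rest ih =>
    intro chunk last out
    have hstep : pvStepA (chunk, last, out) l =
        if pvBdry l last then ([l], some l, out ++ [PySem.Str.join "\n" chunk])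
        else (chunk ++ [l], some l, out) := by
      simp only [pvStepA]
      split_ifs with h1 h2 h3 h4 <;> simp_all [pvBdry]
    simp only [List.foldl_cons, hstep, pvF]
    by_cases hb : pvBdry l last = true
    · rw [if_pos hb, if_pos hb]
      have h := ih [l] (some l) (out ++ [PySem.Str.join "\n" chunk])
      simp only [] at h
      rw [h, List.append_assoc]
      simp
    · rw [if_neg hb, if_neg hb]
      exact ih (chunk ++ [l]) (some l) out

theorem pvStepB_rev (out c : List String) (l : String) :
    pvStepB (out, c.reverse) l =
      if pvSplitH l c then (out ++ [PySem.Str.join "\n" c], (([l] : List String)).reverse)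
      else (out, (l :: c).reverse) := by
  simp only [pvStepB, pvSplitH, List.getLast?_reverse, List.reverse_reverse,
    List.reverse_cons, List.reverse_nil, List.nil_append]
  cases c <;> simp

theorem B_fold (lines : List String) :
    lines.reverse.foldl pvStepB ([], []) =
      match pvG lines with
      | [] => (([] : List String), ([] : List String))
      | c :: cs => ((cs.map (PySem.Str.join "\n")).reverse, c.reverse) := by
  induction lines with
  | nil => simp [pvG]
  | cons l rest ih =>
    rw [List.reverse_cons, List.foldl_append, ih]
    cases hrest : pvG rest with
    | nil =>
      have hG : pvG (l :: rest) = [[l]] := by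
        rw [show pvG (l :: rest) = pvGcons l (pvG rest) from rfl, hrest]
        rfl
      rw [hG]
      simp [pvStepB]
    | cons c cs =>
      simp only [List.foldl_cons, List.foldl_nil, pvStepB_rev]
      by_cases hs : pvSplitH l c = true
      · have hG : pvG (l :: rest) = [l] :: c :: cs := by
          rw [show pvG (l :: rest) = pvGcons l (pvG rest) from rfl, hrest]
          simp [pvGcons, hs]
        rw [if_pos hs, hG]
        simp
      · have hG : pvG (l :: rest) = (l :: c) :: cs := by
          rw [show pvG (l :: rest) = pvGcons l (pvG rest) from rfl, hrest]
          simp [pvGcons, hs]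
        rw [if_neg hs, hG]

theorem A_eq_mapJoin (lines : List String) :
    split_toplevel_stmts lines = (pvG lines).map (PySem.Str.join "\n") := by
  have h := A_fold lines [] none []
  simp only [split_toplevel_stmts]
  rw [h, List.nil_append, pvF_eq_pvGS]
  congr 1
  cases lines with
  | nil => simp [pvGS, pvG]
  | cons l rest =>
    have hb : pvBdry l none = false := by simp [pvBdry]
    obtain ⟨t, css, hg⟩ := pvG_head l rest
    simp only [pvGS, hb, Bool.false_eq_true, if_false, hg]
    simp [pvMerge]

theorem B_eq_mapJoin (lines : List String) :
    split_toplevel_stmts_alt lines = (pvG lines).map (PySem.Str.join "\n") := by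
  simp only [split_toplevel_stmts_alt]
  rw [B_fold]
  cases h : pvG lines with
  | nil => simp
  | cons c cs =>
    have hc : c ≠ [] := by
      cases lines with
      | nil => simp [pvG] at h
      | cons r rs =>
        obtain ⟨t, css, hg⟩ := pvG_head r rs
        rw [hg] at h
        injection h with h1 _
        rw [← h1]; simp
    simp [hc, List.reverse_append, List.reverse_reverse]

-- ===== VERDICT (by name: the statement is the Claim_ definition above) =====
theorem split_toplevel_stmts_spec : Claim_equal_split_toplevel_stmts := by
  intro source _
  unfold Spec_split_toplevel_stmts
  rw [A_eq_mapJoin, B_eq_mapJoin]
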